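-- pv_equiv track=rewrite | github.com/NastyaGalaeva/cs102 | Титаник/titanic.py | survived
-- ===== SOURCE A (Python) =====
-- def survived(tit_data):
--     # Функция возвращает кортеж из двух элементов: количество
--     # выживших и число погибших
--     count_s = 0
--     count_d = 0
--     for pers in tit_data:
--         if pers['survived'] == '1':
--             count_s += 1
--         else:
--             count_d += 1
--     surv = (count_s, count_d)
--     return surv
-- ===== SOURCE B (Python) =====
-- def survived(tit_data):
--     # Divide-and-conquer: recursively split the list in halves, count each
--     # half's (survived, died) pair, and combine by component-wise addition.
--     n = len(tit_data)
--     if n == 0: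
--         return (0, 0)
--     if n == 1:
--         return (1, 0) if tit_data[0]['survived'] == '1' else (0, 1)
--     mid = n // 2
--     ls, ld = survived(tit_data[:mid])
--     rs, rd = survived(tit_data[mid:])
--     return (ls + rs, ld + rd)
-- ===== Notes on version B (the rewrite author's own statement) =====
-- stated objective: alternative
-- what changed: B replaces A's single accumulator loop by divide-and-conquer recursion: split the list at the midpoint, recursively count each half's (survived, died) pair, and combine by component-wise addition.
import Mathlib
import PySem

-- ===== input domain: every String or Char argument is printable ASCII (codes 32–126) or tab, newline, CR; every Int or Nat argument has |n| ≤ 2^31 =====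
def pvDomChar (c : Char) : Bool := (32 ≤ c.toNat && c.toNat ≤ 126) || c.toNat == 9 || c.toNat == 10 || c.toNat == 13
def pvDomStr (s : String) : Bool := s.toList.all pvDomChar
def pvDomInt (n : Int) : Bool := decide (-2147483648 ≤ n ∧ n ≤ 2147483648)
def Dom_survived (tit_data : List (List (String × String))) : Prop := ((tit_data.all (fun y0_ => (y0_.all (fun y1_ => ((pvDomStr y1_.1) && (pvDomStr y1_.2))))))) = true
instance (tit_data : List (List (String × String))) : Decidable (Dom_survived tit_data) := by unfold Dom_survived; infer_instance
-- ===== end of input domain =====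

-- B counts (survived, died) by divide-and-conquer on list halves instead of A's two-counter loop.

-- ===== PORT A =====
def survived (tit_data : List (List (String × String))) : Int × Int :=
  let counts := tit_data.foldl
    (fun (c : Int × Int) pers =>
      if (PySem.Dict.mk pers).get? "survived" == some "1" then (c.1 + 1, c.2) else (c.1, c.2 + 1))
    (0, 0)
  counts

-- ===== PORT B =====
-- tit_data[:mid] / tit_data[mid:] with 0 ≤ mid ≤ n are exactly List.take / List.drop.
-- The recursion runs on a fuel counter initialised to the length (a pure totality
-- guard: fuel never runs out since each half is strictly shorter).
def survivedGo (fuel : Nat) (l : List (List (String × String))) : Int × Int :=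
  match fuel, l with
  | _, [] => (0, 0)
  | _, [p] => if (PySem.Dict.mk p).get? "survived" == some "1" then (1, 0) else (0, 1)
  | fuel + 1, p :: q :: rest =>
    let L := p :: q :: rest
    let mid := L.length / 2
    let lh := survivedGo fuel (L.take mid)
    let rh := survivedGo fuel (L.drop mid)
    (lh.1 + rh.1, lh.2 + rh.2)
  | 0, _ => (0, 0)

def survived_alt (tit_data : List (List (String × String))) : Int × Int :=
  survivedGo tit_data.length tit_data

-- ===== PRECONDITION & SPEC =====
-- Pre_ excludes rows without a 'survived' key, on which Python A raises KeyError.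
def Pre_survived (tit_data : List (List (String × String))) : Prop :=
  (tit_data.all (fun pers => pers.any (fun kv => kv.1 == "survived"))) = true
instance (tit_data : List (List (String × String))) : Decidable (Pre_survived tit_data) := by unfold Pre_survived; infer_instance
def pvWitness_survived : (List (List (String × String))) :=
  [[("survived", "1"), ("name", "Ann")], [("survived", "0")]]
def Spec_survived (tit_data : List (List (String × String))) (out : Int × Int) : Prop := out = survived_alt tit_data
instance (tit_data : List (List (String × String))) (out : Int × Int) : Decidable (Spec_survived tit_data out) := by unfold Spec_survived; infer_instance

-- ===== CLAIM =====
def Claim_equal_survived : Prop := ∀ (tit_data : List (List (String × String))), Dom_survived tit_data → Pre_survived tit_data → Spec_survived tit_data (survived tit_data)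

-- ===== LEMMAS AND PROOFS =====
def survPred (pers : List (String × String)) : Bool :=
  (PySem.Dict.mk pers).get? "survived" == some "1"

theorem survived_fold_eq (tit_data : List (List (String × String))) (s d : Int) :
    tit_data.foldl
      (fun (c : Int × Int) pers =>
        if (PySem.Dict.mk pers).get? "survived" == some "1" then (c.1 + 1, c.2) else (c.1, c.2 + 1))
      (s, d)
    = (s + tit_data.countP survPred,
       d + ((tit_data.length : Int) - tit_data.countP survPred)) := by
  induction tit_data generalizing s d with
  | nil => simp
  | cons p rest ih =>
    simp only [List.foldl_cons]
    by_cases h : ((PySem.Dict.mk p).get? "survived" == some "1") = true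
    · rw [if_pos h, ih]
      have hp : survPred p = true := h
      simp [hp]
      omega
    · rw [if_neg h, ih]
      have hp : survPred p = false := by simpa [survPred] using h
      simp [hp]
      omega

theorem survivedGo_eq (fuel : Nat) (l : List (List (String × String)))
    (hf : l.length <= fuel) :
    survivedGo fuel l
      = ((l.countP survPred : Int), (l.length : Int) - l.countP survPred) := by
  induction fuel generalizing l with
  | zero =>
    match l with
    | [] => simp [survivedGo]
    | [p] => simp at hf
    | p :: q :: rest => simp at hf
  | succ fuel ih =>
    match l with
    | [] => simp [survivedGo]
    | [p] =>
      by_cases h : ((PySem.Dict.mk p).get? "survived" == some "1") = true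
      · have hp : survPred p = true := h
        simp [survivedGo, h, hp]
      · have hp : survPred p = false := by simpa [survPred] using h
        simp [survivedGo, h, hp]
    | p :: q :: rest =>
      rw [survivedGo]
      set L := p :: q :: rest with hL
      set mid := L.length / 2 with hmid
      have hlen : L.length = rest.length + 2 := by simp [hL]
      have htake : (L.take mid).length <= fuel := by
        simp only [List.length_take]; omega
      have hdrop : (L.drop mid).length <= fuel := by
        simp only [List.length_drop]; omega
      rw [ih _ htake, ih _ hdrop]
      have hsplit : L.take mid ++ L.drop mid = L := List.take_append_drop _ _
      have hcount : (L.take mid).countP survPred + (L.drop mid).countP survPred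
          = L.countP survPred := by
        rw [← List.countP_append, hsplit]
      have hlen2 : (L.take mid).length + (L.drop mid).length = L.length := by
        rw [← List.length_append, hsplit]
      refine Prod.ext ?_ ?_ <;> simp only [] <;> omega

theorem survived_alt_eq (tit_data : List (List (String × String))) :
    survived_alt tit_data
      = ((tit_data.countP survPred : Int),
         (tit_data.length : Int) - tit_data.countP survPred) := by
  exact survivedGo_eq _ _ (le_refl _)

-- ===== VERDICT =====
theorem survived_spec : Claim_equal_survived := by
  intro tit_data _ _
  unfold Spec_survived survived
  simp only
  rw [survived_fold_eq, survived_alt_eq]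
  simp
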